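-- pv_equiv track=rewrite | github.com/EnxDev/morpheus | morpheus/policies/ibac.py | _infer_action_resource
-- ===== SOURCE A (Python) =====
-- _UNKNOWN_ACTION = "unknown"
--
-- def _infer_action_resource(step_name: str) -> tuple[str, str]:
--     """Infer action and resource from step name conventions.
--
--     The prefix table is curated for English verb conventions
--     (``fetch_``, ``send_``, ``delete_``, etc.). Step names that do
--     not match any prefix — non-English names, custom vocabularies,
--     unconventional spellings — return :data:`_UNKNOWN_ACTION` for
--     the action component. This is intentional: callers MUST treat
--     the unknown sentinel as "no inference possible" rather than
--     falling back to a permissive default. See CHANGELOG.md for the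
--     security rationale (the historical default of ``"execute"``
--     was a fail-open path).
--
--     Examples:
--         "fetch_payroll_data"  → ("read", "payroll_data")
--         "send_email"          → ("write", "email")
--         "delete_records"      → ("delete", "records")
--         "borrar_registros"    → ("unknown", "borrar_registros")
--     """
--     name = step_name.lower()
--
--     # Action inference from prefix
--     if name.startswith(("fetch_", "get_", "read_", "query_", "check_", "verify_")):
--         action = "read"
--     elif name.startswith(("delete_", "remove_", "drop_", "purge_")):
--         action = "delete"
--     elif name.startswith(("send_", "submit_", "create_", "write_", "update_", "save_", "notify_")):
--         action = "write"
--     elif name.startswith(("format_", "render_", "compute_", "build_", "identify_", "resolve_")):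
--         return "read", step_name  # preparatory, treated as read
--     else:
--         # No prefix matched — return the unknown sentinel rather than
--         # the permissive "execute" default. See module docstring for
--         # _UNKNOWN_ACTION and CHANGELOG.md for migration guidance.
--         action = _UNKNOWN_ACTION
--
--     # Resource inference: strip the action prefix
--     for prefix in ("fetch_", "get_", "read_", "query_", "delete_", "remove_",
--                     "send_", "submit_", "create_", "write_", "update_", "save_",
--                     "check_", "verify_", "notify_", "format_", "render_",
--                     "compute_", "build_", "log_"):
--         if name.startswith(prefix):
--             resource = name[len(prefix):]
--             return action, resource
--
--     return action, step_name
-- ===== SOURCE B (Python) =====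
-- _UNKNOWN_ACTION = "unknown"
--
-- # B: one str.partition on the first underscore, then table lookups keyed on the stem
-- # (the word before the underscore) instead of A's startswith chains and strip loop.
-- _ACTIONS = {
--     "fetch": "read", "get": "read", "read": "read", "query": "read",
--     "check": "read", "verify": "read",
--     "delete": "delete", "remove": "delete", "drop": "delete", "purge": "delete",
--     "send": "write", "submit": "write", "create": "write", "write": "write",
--     "update": "write", "save": "write", "notify": "write",
-- }
--
-- _PREPARATORY = frozenset(("format", "render", "compute", "build", "identify", "resolve"))
--
-- _STRIP = frozenset((
--     "fetch", "get", "read", "query", "delete", "remove",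
--     "send", "submit", "create", "write", "update", "save",
--     "check", "verify", "notify", "format", "render",
--     "compute", "build", "log",
-- ))
--
--
-- def _infer_action_resource(step_name: str) -> tuple[str, str]:
--     name = step_name.lower()
--     stem, sep, rest = name.partition("_")
--     if not sep:
--         return _UNKNOWN_ACTION, step_name
--     if stem in _PREPARATORY:
--         return "read", step_name
--     action = _ACTIONS.get(stem, _UNKNOWN_ACTION)
--     resource = rest if stem in _STRIP else step_name
--     return action, resource
-- ===== Notes on version B (the rewrite author's own statement) =====
-- stated objective: idiomatic
-- what changed: A's four startswith chains plus a 20-iteration strip loop are replaced by a single str.partition('_') that splits off the stem (the word before the first underscore), which is then dispatched through module-level tables keyed on the stem: an action dict, a preparatory set and a strip set; no per-prefix scanning remains.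
import Mathlib
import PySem

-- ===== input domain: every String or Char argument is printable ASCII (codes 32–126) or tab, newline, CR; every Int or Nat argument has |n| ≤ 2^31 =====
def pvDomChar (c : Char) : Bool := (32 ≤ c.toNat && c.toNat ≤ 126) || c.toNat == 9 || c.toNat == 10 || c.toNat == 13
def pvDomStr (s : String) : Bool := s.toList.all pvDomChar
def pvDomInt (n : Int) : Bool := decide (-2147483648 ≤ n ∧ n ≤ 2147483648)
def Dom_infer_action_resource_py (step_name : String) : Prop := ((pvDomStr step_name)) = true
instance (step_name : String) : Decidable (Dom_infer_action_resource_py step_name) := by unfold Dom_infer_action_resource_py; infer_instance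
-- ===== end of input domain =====

-- B replaces A's four startswith chains and 20-iteration strip loop by one partition at the
-- first underscore and table lookups keyed on the stem (objective: idiomatic).

-- ===== PORT A =====
-- the strip loop at the end of A: first matching prefix wins, else (action, original step_name)
def pvStripLoopA (name : List Char) (action : String) (step_name : String) : List (List Char) → String × String
  | [] => (action, step_name)
  | p :: ps =>
    if PySem.Chars.startswith name p then
      (action, String.ofList (PySem.List.slice name (some (p.length : Int)) none))
    else pvStripLoopA name action step_name ps

def pvStripPrefixesA : List (List Char) :=
  [['f', 'e', 't', 'c', 'h', '_'], ['g', 'e', 't', '_'], ['r', 'e', 'a', 'd', '_'], ['q', 'u', 'e', 'r', 'y', '_'], ['d', 'e', 'l', 'e', 't', 'e', '_'], ['r', 'e', 'm', 'o', 'v', 'e', '_'], ['s', 'e', 'n', 'd', '_'], ['s', 'u', 'b', 'm', 'i', 't', '_'], ['c', 'r', 'e', 'a', 't', 'e', '_'], ['w', 'r', 'i', 't', 'e', '_'], ['u', 'p', 'd', 'a', 't', 'e', '_'], ['s', 'a', 'v', 'e', '_'], ['c', 'h', 'e', 'c', 'k', '_'], ['v', 'e', 'r', 'i', 'f', 'y',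 '_'], ['n', 'o', 't', 'i', 'f', 'y', '_'], ['f', 'o', 'r', 'm', 'a', 't', '_'], ['r', 'e', 'n', 'd', 'e', 'r', '_'], ['c', 'o', 'm', 'p', 'u', 't', 'e', '_'], ['b', 'u', 'i', 'l', 'd', '_'], ['l', 'o', 'g', '_']]

def infer_action_resource_py (step_name : String) : String × String :=
  let name := PySem.Chars.lower step_name.toList
  if PySem.Chars.startswith name ['f', 'e', 't', 'c', 'h', '_']
      || PySem.Chars.startswith name ['g', 'e', 't', '_']
      || PySem.Chars.startswith name ['r', 'e', 'a', 'd', '_']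
      || PySem.Chars.startswith name ['q', 'u', 'e', 'r', 'y', '_']
      || PySem.Chars.startswith name ['c', 'h', 'e', 'c', 'k', '_']
      || PySem.Chars.startswith name ['v', 'e', 'r', 'i', 'f', 'y', '_'] then
    pvStripLoopA name "read" step_name pvStripPrefixesA
  else if PySem.Chars.startswith name ['d', 'e', 'l', 'e', 't', 'e', '_']
      || PySem.Chars.startswith name ['r', 'e', 'm', 'o', 'v', 'e', '_']
      || PySem.Chars.startswith name ['d', 'r', 'o', 'p', '_']
      || PySem.Chars.startswith name ['p', 'u', 'r', 'g', 'e', '_'] then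
    pvStripLoopA name "delete" step_name pvStripPrefixesA
  else if PySem.Chars.startswith name ['s', 'e', 'n', 'd', '_']
      || PySem.Chars.startswith name ['s', 'u', 'b', 'm', 'i', 't', '_']
      || PySem.Chars.startswith name ['c', 'r', 'e', 'a', 't', 'e', '_']
      || PySem.Chars.startswith name ['w', 'r', 'i', 't', 'e', '_']
      || PySem.Chars.startswith name ['u', 'p', 'd', 'a', 't', 'e', '_']
      || PySem.Chars.startswith name ['s', 'a', 'v', 'e', '_']
      || PySem.Chars.startswith name ['n', 'o', 't', 'i', 'f', 'y', '_'] then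
    pvStripLoopA name "write" step_name pvStripPrefixesA
  else if PySem.Chars.startswith name ['f', 'o', 'r', 'm', 'a', 't', '_']
      || PySem.Chars.startswith name ['r', 'e', 'n', 'd', 'e', 'r', '_']
      || PySem.Chars.startswith name ['c', 'o', 'm', 'p', 'u', 't', 'e', '_']
      || PySem.Chars.startswith name ['b', 'u', 'i', 'l', 'd', '_']
      || PySem.Chars.startswith name ['i', 'd', 'e', 'n', 't', 'i', 'f', 'y', '_']
      || PySem.Chars.startswith name ['r', 'e', 's', 'o', 'l', 'v', 'e', '_'] then
    ("read", step_name)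
  else
    pvStripLoopA name "unknown" step_name pvStripPrefixesA


-- ===== PORT B =====
-- str.partition('_') ported by hand: exact — splits at the FIRST '_', none when there is no '_'
def pvPartitionUnder : List Char → Option (List Char × List Char)
  | [] => none
  | c :: cs =>
    if c = '_' then some ([], cs)
    else
      match pvPartitionUnder cs with
      | none => none
      | some (p, r) => some (c :: p, r)

def pvActions : PySem.Dict String String :=
  PySem.Dict.ofList
    [("fetch", "read"), ("get", "read"), ("read", "read"), ("query", "read"), ("check", "read"), ("verify", "read"), ("delete", "delete"), ("remove", "delete"), ("drop", "delete"), ("purge", "delete"), ("send", "write"), ("submit", "write"), ("create", "write"), ("write", "write"), ("update", "write"), ("save", "write"), ("notify", "write")]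

def pvPrep : PySem.Set String :=
  PySem.Set.ofList ["format", "render", "compute", "build", "identify", "resolve"]

def pvStrip : PySem.Set String :=
  PySem.Set.ofList ["fetch", "get", "read", "query", "delete", "remove", "send", "submit", "create", "write", "update", "save", "check", "verify", "notify", "format", "render", "compute", "build", "log"]

def infer_action_resource_py_alt (step_name : String) : String × String :=
  match pvPartitionUnder (PySem.Chars.lower step_name.toList) with
  | none => ("unknown", step_name)
  | some (stemCs, restCs) =>
    let stem := String.ofList stemCs
    if PySem.Set.contains pvPrep stem then ("read", step_name)
    else
      (PySem.Dict.getD pvActions stem "unknown",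
       if PySem.Set.contains pvStrip stem then String.ofList restCs else step_name)

-- ===== PRECONDITION & SPEC =====
def Spec_infer_action_resource_py (step_name : String) (out : String × String) : Prop := out = infer_action_resource_py_alt step_name
instance (step_name : String) (out : String × String) : Decidable (Spec_infer_action_resource_py step_name out) := by unfold Spec_infer_action_resource_py; infer_instance

-- ===== CLAIM (what is proved, stated in full; the proofs are below) =====
def Claim_equal_infer_action_resource_py : Prop := ∀ (step_name : String), Dom_infer_action_resource_py step_name → Spec_infer_action_resource_py step_name (infer_action_resource_py step_name)

-- ===== LEMMAS AND PROOFS =====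

lemma pvPartition_none (cs : List Char) (h : pvPartitionUnder cs = none) : '_' ∉ cs := by
  induction cs with
  | nil => simp
  | cons c cs ih =>
    simp only [pvPartitionUnder] at h
    by_cases hc : c = '_'
    · simp [hc] at h
    · rw [if_neg hc] at h
      cases hp : pvPartitionUnder cs with
      | none =>
        simp only [List.mem_cons, not_or]
        exact ⟨fun e => hc e.symm, ih hp⟩
      | some pr => rw [hp] at h; simp at h

lemma pvPartition_some (cs : List Char) : ∀ (stem rest : List Char),
    pvPartitionUnder cs = some (stem, rest) → cs = stem ++ '_' :: rest ∧ '_' ∉ stem := by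
  induction cs with
  | nil => intro stem rest h; simp [pvPartitionUnder] at h
  | cons c cs ih =>
    intro stem rest h
    simp only [pvPartitionUnder] at h
    by_cases hc : c = '_'
    · rw [if_pos hc] at h
      simp only [Option.some.injEq, Prod.mk.injEq] at h
      obtain ⟨h1, h2⟩ := h
      subst h1; subst h2
      simp [hc]
    · rw [if_neg hc] at h
      cases hp : pvPartitionUnder cs with
      | none => rw [hp] at h; simp at h
      | some pr =>
        obtain ⟨p, r⟩ := pr
        rw [hp] at h
        simp only [Option.some.injEq, Prod.mk.injEq] at h
        obtain ⟨h1, h2⟩ := h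
        subst h2
        obtain ⟨e1, e2⟩ := ih p r hp
        constructor
        · rw [← h1, e1]; simp
        · rw [← h1]
          simp only [List.mem_cons, not_or]
          exact ⟨fun e => hc e.symm, e2⟩

lemma pv_sw_false (cs p : List Char) (hp : '_' ∈ p) (h : '_' ∉ cs) :
    PySem.Chars.startswith cs p = false := by
  rw [Bool.eq_false_iff]
  intro hs
  rw [PySem.Chars.startswith_iff] at hs
  exact h (hs.subset hp)

lemma pv_split_unique (a : List Char) : ∀ (b x y : List Char), '_' ∉ a → '_' ∉ b →
    a ++ '_' :: x = b ++ '_' :: y → a = b := by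
  induction a with
  | nil =>
    intro b x y _ hb h
    cases b with
    | nil => rfl
    | cons d ds =>
      simp only [List.nil_append, List.cons_append, List.cons.injEq] at h
      exact absurd (by simp [← h.1]) hb
  | cons c cs ih =>
    intro b x y ha hb h
    cases b with
    | nil =>
      simp only [List.cons_append, List.nil_append, List.cons.injEq] at h
      exact absurd (by simp [h.1]) ha
    | cons d ds =>
      simp only [List.cons_append, List.cons.injEq] at h
      have ha' : '_' ∉ cs := fun m => ha (List.mem_cons_of_mem _ m)
      have hb' : '_' ∉ ds := fun m => hb (List.mem_cons_of_mem _ m)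
      rw [h.1, ih ds x y ha' hb' h.2]

lemma pv_sw (stem rest p q : List Char) (hstem : '_' ∉ stem) (hq : '_' ∉ q)
    (hpq : p = q ++ ['_']) :
    PySem.Chars.startswith (stem ++ '_' :: rest) p = decide (stem = q) := by
  subst hpq
  by_cases h : stem = q
  · subst h
    have h1 : PySem.Chars.startswith (stem ++ '_' :: rest) (stem ++ ['_']) = true :=
      (PySem.Chars.startswith_iff _ _).mpr ⟨rest, by simp⟩
    simp [h1]
  · have h1 : PySem.Chars.startswith (stem ++ '_' :: rest) (q ++ ['_']) = false := by
      rw [Bool.eq_false_iff]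
      intro hs
      rw [PySem.Chars.startswith_iff] at hs
      obtain ⟨t, ht⟩ := hs
      rw [List.append_assoc] at ht
      exact h (pv_split_unique stem q rest t hstem hq ht.symm)
    simp [h1, h]


-- ===== VERDICT (by name: the statement is the Claim_ definition above) =====
theorem infer_action_resource_py_spec : Claim_equal_infer_action_resource_py := by
  unfold Claim_equal_infer_action_resource_py
  intro s _
  unfold Spec_infer_action_resource_py
  unfold infer_action_resource_py infer_action_resource_py_alt
  simp only [pvStripLoopA, pvStripPrefixesA]
  set cs := PySem.Chars.lower s.toList with hcsdef
  rcases hp : pvPartitionUnder cs with _ | ⟨stem, rest⟩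
  · have hn := pvPartition_none cs hp
    simp [
      pv_sw_false cs ['f', 'e', 't', 'c', 'h', '_'] (by decide) hn,
      pv_sw_false cs ['g', 'e', 't', '_'] (by decide) hn,
      pv_sw_false cs ['r', 'e', 'a', 'd', '_'] (by decide) hn,
      pv_sw_false cs ['q', 'u', 'e', 'r', 'y', '_'] (by decide) hn,
      pv_sw_false cs ['c', 'h', 'e', 'c', 'k', '_'] (by decide) hn,
      pv_sw_false cs ['v', 'e', 'r', 'i', 'f', 'y', '_'] (by decide) hn,
      pv_sw_false cs ['d', 'e', 'l', 'e', 't', 'e', '_'] (by decide) hn,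
      pv_sw_false cs ['r', 'e', 'm', 'o', 'v', 'e', '_'] (by decide) hn,
      pv_sw_false cs ['d', 'r', 'o', 'p', '_'] (by decide) hn,
      pv_sw_false cs ['p', 'u', 'r', 'g', 'e', '_'] (by decide) hn,
      pv_sw_false cs ['s', 'e', 'n', 'd', '_'] (by decide) hn,
      pv_sw_false cs ['s', 'u', 'b', 'm', 'i', 't', '_'] (by decide) hn,
      pv_sw_false cs ['c', 'r', 'e', 'a', 't', 'e', '_'] (by decide) hn,
      pv_sw_false cs ['w', 'r', 'i', 't', 'e', '_'] (by decide) hn,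
      pv_sw_false cs ['u', 'p', 'd', 'a', 't', 'e', '_'] (by decide) hn,
      pv_sw_false cs ['s', 'a', 'v', 'e', '_'] (by decide) hn,
      pv_sw_false cs ['n', 'o', 't', 'i', 'f', 'y', '_'] (by decide) hn,
      pv_sw_false cs ['f', 'o', 'r', 'm', 'a', 't', '_'] (by decide) hn,
      pv_sw_false cs ['r', 'e', 'n', 'd', 'e', 'r', '_'] (by decide) hn,
      pv_sw_false cs ['c', 'o', 'm', 'p', 'u', 't', 'e', '_'] (by decide) hn,
      pv_sw_false cs ['b', 'u', 'i', 'l', 'd', '_'] (by decide) hn,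
      pv_sw_false cs ['i', 'd', 'e', 'n', 't', 'i', 'f', 'y', '_'] (by decide) hn,
      pv_sw_false cs ['r', 'e', 's', 'o', 'l', 'v', 'e', '_'] (by decide) hn,
      pv_sw_false cs ['l', 'o', 'g', '_'] (by decide) hn]
  · obtain ⟨hcs, hstem⟩ := pvPartition_some cs stem rest hp
    rw [hcs]
    rw [
      pv_sw stem rest ['f', 'e', 't', 'c', 'h', '_'] ['f', 'e', 't', 'c', 'h'] hstem (by decide) rfl,
      pv_sw stem rest ['g', 'e', 't', '_'] ['g', 'e', 't'] hstem (by decide) rfl,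
      pv_sw stem rest ['r', 'e', 'a', 'd', '_'] ['r', 'e', 'a', 'd'] hstem (by decide) rfl,
      pv_sw stem rest ['q', 'u', 'e', 'r', 'y', '_'] ['q', 'u', 'e', 'r', 'y'] hstem (by decide) rfl,
      pv_sw stem rest ['c', 'h', 'e', 'c', 'k', '_'] ['c', 'h', 'e', 'c', 'k'] hstem (by decide) rfl,
      pv_sw stem rest ['v', 'e', 'r', 'i', 'f', 'y', '_'] ['v', 'e', 'r', 'i', 'f', 'y'] hstem (by decide) rfl,
      pv_sw stem rest ['d', 'e', 'l', 'e', 't', 'e', '_'] ['d', 'e', 'l', 'e', 't', 'e'] hstem (by decide) rfl,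
      pv_sw stem rest ['r', 'e', 'm', 'o', 'v', 'e', '_'] ['r', 'e', 'm', 'o', 'v', 'e'] hstem (by decide) rfl,
      pv_sw stem rest ['d', 'r', 'o', 'p', '_'] ['d', 'r', 'o', 'p'] hstem (by decide) rfl,
      pv_sw stem rest ['p', 'u', 'r', 'g', 'e', '_'] ['p', 'u', 'r', 'g', 'e'] hstem (by decide) rfl,
      pv_sw stem rest ['s', 'e', 'n', 'd', '_'] ['s', 'e', 'n', 'd'] hstem (by decide) rfl,
      pv_sw stem rest ['s', 'u', 'b', 'm', 'i', 't', '_'] ['s', 'u', 'b', 'm', 'i', 't'] hstem (by decide) rfl,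
      pv_sw stem rest ['c', 'r', 'e', 'a', 't', 'e', '_'] ['c', 'r', 'e', 'a', 't', 'e'] hstem (by decide) rfl,
      pv_sw stem rest ['w', 'r', 'i', 't', 'e', '_'] ['w', 'r', 'i', 't', 'e'] hstem (by decide) rfl,
      pv_sw stem rest ['u', 'p', 'd', 'a', 't', 'e', '_'] ['u', 'p', 'd', 'a', 't', 'e'] hstem (by decide) rfl,
      pv_sw stem rest ['s', 'a', 'v', 'e', '_'] ['s', 'a', 'v', 'e'] hstem (by decide) rfl,
      pv_sw stem rest ['n', 'o', 't', 'i', 'f', 'y', '_'] ['n', 'o', 't', 'i', 'f', 'y'] hstem (by decide) rfl,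
      pv_sw stem rest ['f', 'o', 'r', 'm', 'a', 't', '_'] ['f', 'o', 'r', 'm', 'a', 't'] hstem (by decide) rfl,
      pv_sw stem rest ['r', 'e', 'n', 'd', 'e', 'r', '_'] ['r', 'e', 'n', 'd', 'e', 'r'] hstem (by decide) rfl,
      pv_sw stem rest ['c', 'o', 'm', 'p', 'u', 't', 'e', '_'] ['c', 'o', 'm', 'p', 'u', 't', 'e'] hstem (by decide) rfl,
      pv_sw stem rest ['b', 'u', 'i', 'l', 'd', '_'] ['b', 'u', 'i', 'l', 'd'] hstem (by decide) rfl,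
      pv_sw stem rest ['i', 'd', 'e', 'n', 't', 'i', 'f', 'y', '_'] ['i', 'd', 'e', 'n', 't', 'i', 'f', 'y'] hstem (by decide) rfl,
      pv_sw stem rest ['r', 'e', 's', 'o', 'l', 'v', 'e', '_'] ['r', 'e', 's', 'o', 'l', 'v', 'e'] hstem (by decide) rfl,
      pv_sw stem rest ['l', 'o', 'g', '_'] ['l', 'o', 'g'] hstem (by decide) rfl]
    by_cases h0 : stem = ['f', 'e', 't', 'c', 'h']
    · subst h0
      have c2 : PySem.Dict.getD pvActions (String.ofList ['f', 'e', 't', 'c', 'h']) "unknown" = "read" := by decide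
      have m1 : "fetch" ∉ pvPrep := by decide
      have m2 : "fetch" ∈ pvStrip := by decide
      simp [c2, m1, m2, PySem.List.slice_from]
    by_cases h1 : stem = ['g', 'e', 't']
    · subst h1
      have c2 : PySem.Dict.getD pvActions (String.ofList ['g', 'e', 't']) "unknown" = "read" := by decide
      have m1 : "get" ∉ pvPrep := by decide
      have m2 : "get" ∈ pvStrip := by decide
      simp [c2, m1, m2, PySem.List.slice_from]
    by_cases h2 : stem = ['r', 'e', 'a', 'd']
    · subst h2
      have c2 : PySem.Dict.getD pvActions (String.ofList ['r', 'e', 'a', 'd']) "unknown" = "read" := by decide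
      have m1 : "read" ∉ pvPrep := by decide
      have m2 : "read" ∈ pvStrip := by decide
      simp [c2, m1, m2, PySem.List.slice_from]
    by_cases h3 : stem = ['q', 'u', 'e', 'r', 'y']
    · subst h3
      have c2 : PySem.Dict.getD pvActions (String.ofList ['q', 'u', 'e', 'r', 'y']) "unknown" = "read" := by decide
      have m1 : "query" ∉ pvPrep := by decide
      have m2 : "query" ∈ pvStrip := by decide
      simp [c2, m1, m2, PySem.List.slice_from]
    by_cases h4 : stem = ['c', 'h', 'e', 'c', 'k']
    · subst h4
      have c2 : PySem.Dict.getD pvActions (String.ofList ['c', 'h', 'e', 'c', 'k']) "unknown" = "read" := by decide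
      have m1 : "check" ∉ pvPrep := by decide
      have m2 : "check" ∈ pvStrip := by decide
      simp [c2, m1, m2, PySem.List.slice_from]
    by_cases h5 : stem = ['v', 'e', 'r', 'i', 'f', 'y']
    · subst h5
      have c2 : PySem.Dict.getD pvActions (String.ofList ['v', 'e', 'r', 'i', 'f', 'y']) "unknown" = "read" := by decide
      have m1 : "verify" ∉ pvPrep := by decide
      have m2 : "verify" ∈ pvStrip := by decide
      simp [c2, m1, m2, PySem.List.slice_from]
    by_cases h6 : stem = ['d', 'e', 'l', 'e', 't', 'e']
    · subst h6
      have c2 : PySem.Dict.getD pvActions (String.ofList ['d', 'e', 'l', 'e', 't', 'e']) "unknown" = "delete" := by decide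
      have m1 : "delete" ∉ pvPrep := by decide
      have m2 : "delete" ∈ pvStrip := by decide
      simp [c2, m1, m2, PySem.List.slice_from]
    by_cases h7 : stem = ['r', 'e', 'm', 'o', 'v', 'e']
    · subst h7
      have c2 : PySem.Dict.getD pvActions (String.ofList ['r', 'e', 'm', 'o', 'v', 'e']) "unknown" = "delete" := by decide
      have m1 : "remove" ∉ pvPrep := by decide
      have m2 : "remove" ∈ pvStrip := by decide
      simp [c2, m1, m2, PySem.List.slice_from]
    by_cases h8 : stem = ['d', 'r', 'o', 'p']
    · subst h8
      have c2 : PySem.Dict.getD pvActions (String.ofList ['d', 'r', 'o', 'p']) "unknown" = "delete" := by decide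
      have m1 : "drop" ∉ pvPrep := by decide
      have m2 : "drop" ∉ pvStrip := by decide
      simp [c2, m1, m2]
    by_cases h9 : stem = ['p', 'u', 'r', 'g', 'e']
    · subst h9
      have c2 : PySem.Dict.getD pvActions (String.ofList ['p', 'u', 'r', 'g', 'e']) "unknown" = "delete" := by decide
      have m1 : "purge" ∉ pvPrep := by decide
      have m2 : "purge" ∉ pvStrip := by decide
      simp [c2, m1, m2]
    by_cases h10 : stem = ['s', 'e', 'n', 'd']
    · subst h10
      have c2 : PySem.Dict.getD pvActions (String.ofList ['s', 'e', 'n', 'd']) "unknown" = "write" := by decide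
      have m1 : "send" ∉ pvPrep := by decide
      have m2 : "send" ∈ pvStrip := by decide
      simp [c2, m1, m2, PySem.List.slice_from]
    by_cases h11 : stem = ['s', 'u', 'b', 'm', 'i', 't']
    · subst h11
      have c2 : PySem.Dict.getD pvActions (String.ofList ['s', 'u', 'b', 'm', 'i', 't']) "unknown" = "write" := by decide
      have m1 : "submit" ∉ pvPrep := by decide
      have m2 : "submit" ∈ pvStrip := by decide
      simp [c2, m1, m2, PySem.List.slice_from]
    by_cases h12 : stem = ['c', 'r', 'e', 'a', 't', 'e']
    · subst h12
      have c2 : PySem.Dict.getD pvActions (String.ofList ['c', 'r', 'e', 'a', 't', 'e']) "unknown" = "write" := by decide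
      have m1 : "create" ∉ pvPrep := by decide
      have m2 : "create" ∈ pvStrip := by decide
      simp [c2, m1, m2, PySem.List.slice_from]
    by_cases h13 : stem = ['w', 'r', 'i', 't', 'e']
    · subst h13
      have c2 : PySem.Dict.getD pvActions (String.ofList ['w', 'r', 'i', 't', 'e']) "unknown" = "write" := by decide
      have m1 : "write" ∉ pvPrep := by decide
      have m2 : "write" ∈ pvStrip := by decide
      simp [c2, m1, m2, PySem.List.slice_from]
    by_cases h14 : stem = ['u', 'p', 'd', 'a', 't', 'e']
    · subst h14
      have c2 : PySem.Dict.getD pvActions (String.ofList ['u', 'p', 'd', 'a', 't', 'e']) "unknown" = "write" := by decide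
      have m1 : "update" ∉ pvPrep := by decide
      have m2 : "update" ∈ pvStrip := by decide
      simp [c2, m1, m2, PySem.List.slice_from]
    by_cases h15 : stem = ['s', 'a', 'v', 'e']
    · subst h15
      have c2 : PySem.Dict.getD pvActions (String.ofList ['s', 'a', 'v', 'e']) "unknown" = "write" := by decide
      have m1 : "save" ∉ pvPrep := by decide
      have m2 : "save" ∈ pvStrip := by decide
      simp [c2, m1, m2, PySem.List.slice_from]
    by_cases h16 : stem = ['n', 'o', 't', 'i', 'f', 'y']
    · subst h16
      have c2 : PySem.Dict.getD pvActions (String.ofList ['n', 'o', 't', 'i', 'f', 'y']) "unknown" = "write" := by decide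
      have m1 : "notify" ∉ pvPrep := by decide
      have m2 : "notify" ∈ pvStrip := by decide
      simp [c2, m1, m2, PySem.List.slice_from]
    by_cases h17 : stem = ['f', 'o', 'r', 'm', 'a', 't']
    · subst h17
      have m1 : "format" ∈ pvPrep := by decide
      simp [m1]
    by_cases h18 : stem = ['r', 'e', 'n', 'd', 'e', 'r']
    · subst h18
      have m1 : "render" ∈ pvPrep := by decide
      simp [m1]
    by_cases h19 : stem = ['c', 'o', 'm', 'p', 'u', 't', 'e']
    · subst h19
      have m1 : "compute" ∈ pvPrep := by decide
      simp [m1]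
    by_cases h20 : stem = ['b', 'u', 'i', 'l', 'd']
    · subst h20
      have m1 : "build" ∈ pvPrep := by decide
      simp [m1]
    by_cases h21 : stem = ['i', 'd', 'e', 'n', 't', 'i', 'f', 'y']
    · subst h21
      have m1 : "identify" ∈ pvPrep := by decide
      simp [m1]
    by_cases h22 : stem = ['r', 'e', 's', 'o', 'l', 'v', 'e']
    · subst h22
      have m1 : "resolve" ∈ pvPrep := by decide
      simp [m1]
    by_cases h23 : stem = ['l', 'o', 'g']
    · subst h23
      have c2 : PySem.Dict.getD pvActions (String.ofList ['l', 'o', 'g']) "unknown" = "unknown" := by decide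
      have m1 : "log" ∉ pvPrep := by decide
      have m2 : "log" ∈ pvStrip := by decide
      simp [c2, m1, m2, PySem.List.slice_from]
    -- no stem matched: both sides return ("unknown", step_name)
    have g0 : String.ofList stem ≠ "fetch" := fun c => h0 (by simpa using congrArg String.toList c)
    have g1 : String.ofList stem ≠ "get" := fun c => h1 (by simpa using congrArg String.toList c)
    have g2 : String.ofList stem ≠ "read" := fun c => h2 (by simpa using congrArg String.toList c)
    have g3 : String.ofList stem ≠ "query" := fun c => h3 (by simpa using congrArg String.toList c)
    have g4 : String.ofList stem ≠ "check" := fun c => h4 (by simpa using congrArg String.toList c)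
    have g5 : String.ofList stem ≠ "verify" := fun c => h5 (by simpa using congrArg String.toList c)
    have g6 : String.ofList stem ≠ "delete" := fun c => h6 (by simpa using congrArg String.toList c)
    have g7 : String.ofList stem ≠ "remove" := fun c => h7 (by simpa using congrArg String.toList c)
    have g8 : String.ofList stem ≠ "drop" := fun c => h8 (by simpa using congrArg String.toList c)
    have g9 : String.ofList stem ≠ "purge" := fun c => h9 (by simpa using congrArg String.toList c)
    have g10 : String.ofList stem ≠ "send" := fun c => h10 (by simpa using congrArg String.toList c)
    have g11 : String.ofList stem ≠ "submit" := fun c => h11 (by simpa using congrArg String.toList c)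
    have g12 : String.ofList stem ≠ "create" := fun c => h12 (by simpa using congrArg String.toList c)
    have g13 : String.ofList stem ≠ "write" := fun c => h13 (by simpa using congrArg String.toList c)
    have g14 : String.ofList stem ≠ "update" := fun c => h14 (by simpa using congrArg String.toList c)
    have g15 : String.ofList stem ≠ "save" := fun c => h15 (by simpa using congrArg String.toList c)
    have g16 : String.ofList stem ≠ "notify" := fun c => h16 (by simpa using congrArg String.toList c)
    have g17 : String.ofList stem ≠ "format" := fun c => h17 (by simpa using congrArg String.toList c)
    have g18 : String.ofList stem ≠ "render" := fun c => h18 (by simpa using congrArg String.toList c)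
    have g19 : String.ofList stem ≠ "compute" := fun c => h19 (by simpa using congrArg String.toList c)
    have g20 : String.ofList stem ≠ "build" := fun c => h20 (by simpa using congrArg String.toList c)
    have g21 : String.ofList stem ≠ "identify" := fun c => h21 (by simpa using congrArg String.toList c)
    have g22 : String.ofList stem ≠ "resolve" := fun c => h22 (by simpa using congrArg String.toList c)
    have g23 : String.ofList stem ≠ "log" := fun c => h23 (by simpa using congrArg String.toList c)
    have eAct : pvActions = PySem.Dict.mk [("fetch", "read"), ("get", "read"), ("read", "read"), ("query", "read"), ("check", "read"), ("verify", "read"), ("delete", "delete"), ("remove", "delete"), ("drop", "delete"), ("purge", "delete"), ("send", "write"), ("submit", "write"), ("create", "write"), ("write", "write"), ("update", "write"), ("save", "write"), ("notify", "write")] := by decide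
    simp [PySem.Set.contains, PySem.Dict.getD, PySem.Dict.get?, eAct, pvPrep, pvStrip, PySem.Set.ofList,
      h0, h1, h2, h3, h4, h5, h6, h7, h8, h9, h10, h11, h12, h13, h14, h15, h16, h17, h18, h19, h20, h21, h22, h23,
      g0, g1, g2, g3, g4, g5, g6, g7, g10, g11, g12, g13, g14, g15, g16, g17, g18, g19, g20, g21, g22, g23,
      Ne.symm g0, Ne.symm g1, Ne.symm g2, Ne.symm g3, Ne.symm g4, Ne.symm g5, Ne.symm g6, Ne.symm g7, Ne.symm g8, Ne.symm g9, Ne.symm g10, Ne.symm g11, Ne.symm g12, Ne.symm g13, Ne.symm g14, Ne.symm g15, Ne.symm g16]
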